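-- pv_equiv track=rewrite | github.com/matsu582/o2md | x2md_tables.py | _identify_useful_columns
-- ===== SOURCE A (Python) =====
-- from typing import List, Dict, Tuple, Optional, Any, Set
--
-- def _identify_useful_columns(table_data: List[List[str]]) -> List[int]:
--     """テーブルから有用な列を特定"""
--     if not table_data:
--         return []
--
--     num_cols = len(table_data[0]) if table_data else 0
--     useful_columns = []
--
--     for col_idx in range(num_cols):
--         # 列に有意義な内容があるかチェック
--         has_content = False
--         for row_data in table_data:
--             if col_idx < len(row_data) and row_data[col_idx].strip():
--                 has_content = True
--                 break
--
--         if has_content: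
--             useful_columns.append(col_idx)
--
--     # 少なくとも2列は保持する（最低限のテーブル構造）
--     if len(useful_columns) < 2 and num_cols >= 2:
--         useful_columns = [0, min(1, num_cols - 1)]
--
--     return useful_columns
-- ===== SOURCE B (Python) =====
-- def _identify_useful_columns(table_data):
--     """テーブルから有用な列を特定"""
--     if not table_data:
--         return []
--     num_cols = len(table_data[0])
--     found = set()
--     for row in table_data:
--         for col_idx in range(num_cols):
--             if col_idx < len(row) and row[col_idx].strip():
--                 found.add(col_idx)
--     useful_columns = [c for c in range(num_cols) if c in found]
--     if len(useful_columns) < 2 and num_cols >= 2: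
--         useful_columns = [0, min(1, num_cols - 1)]
--     return useful_columns
-- ===== Notes on version B (the rewrite author's own statement) =====
-- stated objective: alternative
-- what changed: Replaces A's column-major nested scan with early break (for each column, scan rows until content) by a single row-major pass that records content-bearing columns in a set, then rebuilds the ascending column list from range(num_cols); guards are unchanged.
import Mathlib
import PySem

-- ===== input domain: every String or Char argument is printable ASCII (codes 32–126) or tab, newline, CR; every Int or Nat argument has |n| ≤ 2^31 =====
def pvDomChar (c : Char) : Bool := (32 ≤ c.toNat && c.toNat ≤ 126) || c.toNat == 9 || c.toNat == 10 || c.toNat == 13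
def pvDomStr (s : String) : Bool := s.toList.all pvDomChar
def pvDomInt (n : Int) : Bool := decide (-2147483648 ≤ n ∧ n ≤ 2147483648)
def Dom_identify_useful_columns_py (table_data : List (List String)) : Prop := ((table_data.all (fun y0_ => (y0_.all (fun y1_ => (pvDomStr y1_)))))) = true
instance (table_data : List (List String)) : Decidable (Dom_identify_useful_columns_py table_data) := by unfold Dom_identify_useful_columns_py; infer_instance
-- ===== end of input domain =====

-- B replaces A's column-major scan (per column, scan rows with early break) by one
-- row-major pass collecting content-bearing columns in a set, then rebuilding the
-- ascending list from range(num_cols); same cost, alternative decomposition.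

-- ===== PORT A =====
def identify_useful_columns_py (table_data : List (List String)) : List Int :=
  if table_data = [] then []
  else
    let num_cols : Int := ((table_data.headD []).length : Int)
    let useful : List Int :=
      (PySem.List.pyRange 0 num_cols 1).foldl
        (fun acc col_idx =>
          let has_content : Bool := table_data.any (fun row_data =>
            decide (col_idx < (row_data.length : Int)) &&
            !(PySem.Str.strip (PySem.List.pyGetD row_data col_idx "") == ""))
          if has_content then acc ++ [col_idx] else acc) []
    if useful.length < 2 ∧ 2 ≤ num_cols then [0, min 1 (num_cols - 1)] else useful

-- ===== PORT B =====
def identify_useful_columns_py_alt (table_data : List (List String)) : List Int :=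
  if table_data = [] then []
  else
    let num_cols : Int := ((table_data.headD []).length : Int)
    let found : PySem.Set Int :=
      table_data.foldl
        (fun acc row =>
          (PySem.List.pyRange 0 num_cols 1).foldl
            (fun acc2 col_idx =>
              if col_idx < (row.length : Int) ∧
                 PySem.Str.strip (PySem.List.pyGetD row col_idx "") ≠ "" then
                PySem.Set.add acc2 col_idx
              else acc2) acc)
        PySem.Set.empty
    let useful : List Int :=
      (PySem.List.pyRange 0 num_cols 1).filter (fun c => PySem.Set.contains found c)
    if useful.length < 2 ∧ 2 ≤ num_cols then [0, min 1 (num_cols - 1)] else useful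

-- ===== PRECONDITION & SPEC =====
def Spec_identify_useful_columns_py (table_data : List (List String)) (out : List Int) : Prop := out = identify_useful_columns_py_alt table_data
instance (table_data : List (List String)) (out : List Int) : Decidable (Spec_identify_useful_columns_py table_data out) := by unfold Spec_identify_useful_columns_py; infer_instance

-- ===== CLAIM (what is proved, stated in full; the proofs are below) =====
def Claim_equal_identify_useful_columns_py : Prop := ∀ (table_data : List (List String)), Dom_identify_useful_columns_py table_data → Spec_identify_useful_columns_py table_data (identify_useful_columns_py table_data)

-- ===== LEMMAS AND PROOFS =====

-- membership in the set built by B's inner loop over one row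
lemma pv_mem_inner (l : List Int) (Q : Int → Prop) [DecidablePred Q]
    (acc : PySem.Set Int) (c : Int) :
    c ∈ l.foldl (fun a x => if Q x then PySem.Set.add a x else a) acc ↔
      c ∈ acc ∨ (c ∈ l ∧ Q c) := by
  induction l generalizing acc with
  | nil => simp
  | cons x xs ih =>
    simp only [List.foldl_cons]
    rw [ih]
    by_cases h : Q x
    · by_cases hc : c = x
      · subst hc; simp [h, PySem.Set.mem_add]
      · simp [h, PySem.Set.mem_add, hc]
    · by_cases hc : c = x
      · subst hc; simp [h]
      · simp [h, hc]
  -- note: List.mem_cons and the if-split are handled by simp/tauto above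

-- membership in the set built by B's full row-major pass
lemma pv_mem_outer (rows : List (List String)) (n : Int)
    (Q : Int → List String → Prop) [inst : ∀ c r, Decidable (Q c r)]
    (acc : PySem.Set Int) (c : Int) :
    c ∈ rows.foldl
        (fun a row =>
          (PySem.List.pyRange 0 n 1).foldl
            (fun a2 x => if Q x row then PySem.Set.add a2 x else a2) a) acc ↔
      c ∈ acc ∨ (c ∈ PySem.List.pyRange 0 n 1 ∧ ∃ row ∈ rows, Q c row) := by
  induction rows generalizing acc with
  | nil => simp
  | cons r rs ih =>
    simp only [List.foldl_cons]
    rw [ih, pv_mem_inner]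
    simp only [List.exists_mem_cons_iff]
    tauto

-- the two ports compute the same list on every input
lemma pv_ports_eq (table_data : List (List String)) :
    identify_useful_columns_py table_data = identify_useful_columns_py_alt table_data := by
  by_cases hnil : table_data = []
  · simp [identify_useful_columns_py, identify_useful_columns_py_alt, hnil]
  · unfold identify_useful_columns_py identify_useful_columns_py_alt
    simp only [if_neg hnil]
    set n : Int := ((table_data.headD []).length : Int) with hn
    have hfilter :
        (PySem.List.pyRange 0 n 1).foldl
          (fun acc col_idx =>
            let has_content : Bool := table_data.any (fun row_data =>
              decide (col_idx < (row_data.length : Int)) &&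
              !(PySem.Str.strip (PySem.List.pyGetD row_data col_idx "") == ""))
            if has_content then acc ++ [col_idx] else acc) [] =
        (PySem.List.pyRange 0 n 1).filter
          (fun c => PySem.Set.contains
            (table_data.foldl
              (fun acc row =>
                (PySem.List.pyRange 0 n 1).foldl
                  (fun acc2 col_idx =>
                    if col_idx < (row.length : Int) ∧
                       PySem.Str.strip (PySem.List.pyGetD row col_idx "") ≠ "" then
                      PySem.Set.add acc2 col_idx
                    else acc2) acc)
              PySem.Set.empty) c) := by
      rw [PySem.List.foldl_append_if_eq_filter]
      rw [List.nil_append]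
      apply List.filter_congr
      intro c hc
      rw [Bool.eq_iff_iff]
      rw [PySem.Set.contains_iff]
      rw [pv_mem_outer table_data n
        (fun x row => x < (row.length : Int) ∧
          PySem.Str.strip (PySem.List.pyGetD row x "") ≠ "")]
      simp [List.any_eq_true, PySem.Set.empty, hc]
    rw [hfilter]
  -- after rewriting, both sides are literally the same term

-- ===== VERDICT (by name: the statement is the Claim_ definition above) =====
theorem identify_useful_columns_py_spec : Claim_equal_identify_useful_columns_py := by
  intro table_data _
  unfold Spec_identify_useful_columns_py
  exact pv_ports_eq table_data
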